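-- pv_equiv track=rewrite | github.com/chenwenhang/AlgorithmPractice | src/leetcode/route_between_nodes_LCCI.py | findWhetherExistsPath
-- ===== SOURCE A (Python) =====
-- from collections import defaultdict, deque
-- from typing import List
--
-- def findWhetherExistsPath(n: int, graph: List[List[int]], start: int, target: int) -> bool:
--     routs = defaultdict(set)
--     for item in graph:
--         routs[item[0]].add(item[1])
--     q = deque([start])
--     while q and routs:
--         node = q.popleft()
--         for point in routs[node]:
--             if point == target:
--                 return True
--             else:
--                 q.append(point)
--         routs.pop(node)
--     return False
-- ===== SOURCE B (Python) =====
-- def findWhetherExistsPath(n, graph, start, target):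
--     # Round-based reachability closure: no queue/stack, no visited bookkeeping.
--     # After len(graph) full passes over the edge list the reachable set is a
--     # fixpoint (each non-final pass adds at least one node, and at most
--     # len(graph) nodes are ever addable), so a final membership scan decides
--     # whether some reachable node has an edge into target (path length >= 1,
--     # as in A: start == target alone does not count).
--     edges = [(item[0], item[1]) for item in graph]
--     reach = {start}
--     for _ in range(len(graph)):
--         for u, v in edges:
--             if u in reach:
--                 reach.add(v)
--     return any(u in reach and v == target for u, v in edges)
-- ===== Notes on version B (the rewrite author's own statement) =====
-- stated objective: alternative
-- what changed: A's deque-BFS over a defaultdict-of-sets that pops each expanded node's adjacency entry is replaced by a round-based reachability closure: len(graph) monotone passes over the plain edge list grow a reachable set to its fixpoint, then one membership scan checks for an edge from a reachable node into target.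
import Mathlib
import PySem

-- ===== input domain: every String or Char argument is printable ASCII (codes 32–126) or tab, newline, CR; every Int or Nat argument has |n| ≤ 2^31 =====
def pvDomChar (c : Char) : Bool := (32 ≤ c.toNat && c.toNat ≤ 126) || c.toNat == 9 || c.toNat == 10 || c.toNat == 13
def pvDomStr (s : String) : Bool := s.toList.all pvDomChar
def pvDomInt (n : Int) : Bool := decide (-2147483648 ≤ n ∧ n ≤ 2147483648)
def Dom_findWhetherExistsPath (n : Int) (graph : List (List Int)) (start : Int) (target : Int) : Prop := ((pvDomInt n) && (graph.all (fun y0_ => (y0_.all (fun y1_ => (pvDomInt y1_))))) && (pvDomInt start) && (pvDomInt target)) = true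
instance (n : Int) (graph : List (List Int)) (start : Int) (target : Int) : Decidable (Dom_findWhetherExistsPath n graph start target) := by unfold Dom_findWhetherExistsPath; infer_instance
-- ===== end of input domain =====

-- B replaces A's deque-BFS over a shrinking defaultdict by a round-based reachability
-- closure over the plain edge list (objective: alternative; same return value).

-- ===== PORT A =====
-- item[0] / item[1]; inside Pre_ every row has length ≥ 2, so the .getD 0 default is never used
def pvAt0 (row : List Int) : Int := (PySem.List.pyGet? row 0).getD 0
def pvAt1 (row : List Int) : Int := (PySem.List.pyGet? row 1).getD 0

-- routs = defaultdict(set); for item in graph: routs[item[0]].add(item[1])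
def pvBuildRouts (graph : List (List Int)) : PySem.Dict Int (PySem.Set Int) :=
  graph.foldl
    (fun d row => d.modify (pvAt0 row) PySem.Set.empty (fun s => s.add (pvAt1 row)))
    PySem.Dict.empty

-- termination helpers for the while loop (cited by decreasing_by)
lemma pvErase_size_lt (d : PySem.Dict Int (PySem.Set Int)) (k : Int)
    (h : d.contains k = true) : (d.erase k).size < d.size := by
  rcases d with ⟨items⟩
  simp only [PySem.Dict.contains, List.any_eq_true] at h
  obtain ⟨p, hp, hk⟩ := h
  simp only [PySem.Dict.erase, PySem.Dict.size]
  exact List.length_filter_lt_length_iff_exists.mpr ⟨p, hp, by simp [hk]⟩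

lemma pvErase_of_not_contains (d : PySem.Dict Int (PySem.Set Int)) (k : Int)
    (h : d.contains k = false) : d.erase k = d := by
  rcases d with ⟨items⟩
  simp only [PySem.Dict.contains, List.any_eq_false] at h
  simp only [PySem.Dict.erase]
  congr 1
  refine List.filter_eq_self.mpr (fun p hp => ?_)
  simpa using h p hp

-- while q and routs: node = q.popleft(); for point in routs[node]: …; routs.pop(node)
-- (defaultdict access routs[node] on a missing key creates an empty entry that the
--  following pop removes again: net effect = erase, which is a no-op on a missing key)
def pvBfsA (target : Int) (routs : PySem.Dict Int (PySem.Set Int)) (q : List Int) : Bool :=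
  match q with
  | [] => false
  | node :: qrest =>
    if routs.items = [] then false
    else if (routs.getD node PySem.Set.empty).contains target then true
    else pvBfsA target (routs.erase node) (qrest ++ routs.getD node PySem.Set.empty)
termination_by (routs.size, q.length)
decreasing_by
  by_cases h : routs.contains node = true
  · exact Prod.Lex.left _ _ (pvErase_size_lt routs node h)
  · have he : routs.erase node = routs :=
      pvErase_of_not_contains routs node (by simpa using h)
    have hg : routs.getD node PySem.Set.empty = PySem.Set.empty :=
      PySem.Dict.getD_of_not_contains routs _ (by simpa using h)
    rw [he, hg]
    exact Prod.Lex.right _ (by simp [PySem.Set.empty])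

def findWhetherExistsPath (n : Int) (graph : List (List Int)) (start : Int) (target : Int) : Bool :=
  pvBfsA target (pvBuildRouts graph) [start]

-- ===== PORT B =====
-- edges = [(item[0], item[1]) for item in graph]
def pvEdges (graph : List (List Int)) : List (Int × Int) :=
  graph.map (fun row => (pvAt0 row, pvAt1 row))

-- one pass: for u, v in edges: if u in reach: reach.add(v)
def pvPass (edges : List (Int × Int)) (reach : PySem.Set Int) : PySem.Set Int :=
  edges.foldl (fun r e => if r.contains e.1 then r.add e.2 else r) reach

def findWhetherExistsPath_alt (n : Int) (graph : List (List Int)) (start : Int) (target : Int) : Bool :=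
  let edges := pvEdges graph
  let reach := (PySem.List.pyRange 0 (graph.length : Int) 1).foldl
    (fun r _ => pvPass edges r) (PySem.Set.ofList [start])
  edges.any (fun e => reach.contains e.1 && e.2 == target)

-- ===== PRECONDITION & SPEC =====
-- Pre_ excludes exactly the inputs where A raises IndexError: a row of graph with
-- fewer than two entries (B raises there as well).
def Pre_findWhetherExistsPath (n : Int) (graph : List (List Int)) (start : Int) (target : Int) : Prop :=
  ∀ row ∈ graph, 2 ≤ row.length
instance (n : Int) (graph : List (List Int)) (start : Int) (target : Int) : Decidable (Pre_findWhetherExistsPath n graph start target) := by unfold Pre_findWhetherExistsPath; infer_instance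

def pvWitness_findWhetherExistsPath : Int × List (List Int) × Int × Int := (3, [[0, 1], [1, 2]], 0, 2)

def Spec_findWhetherExistsPath (n : Int) (graph : List (List Int)) (start : Int) (target : Int) (out : Bool) : Prop := out = findWhetherExistsPath_alt n graph start target
instance (n : Int) (graph : List (List Int)) (start : Int) (target : Int) (out : Bool) : Decidable (Spec_findWhetherExistsPath n graph start target out) := by unfold Spec_findWhetherExistsPath; infer_instance

-- ===== CLAIM (what is proved, stated in full; the proofs are below) =====
def Claim_equal_findWhetherExistsPath : Prop := ∀ (n : Int) (graph : List (List Int)) (start : Int) (target : Int), Dom_findWhetherExistsPath n graph start target → Pre_findWhetherExistsPath n graph start target → Spec_findWhetherExistsPath n graph start target (findWhetherExistsPath n graph start target)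

-- ===== LEMMAS AND PROOFS =====

-- adjacency of a node in a dict state, and the step relation it induces
def pvAdj (d : PySem.Dict Int (PySem.Set Int)) (a : Int) : PySem.Set Int :=
  d.getD a PySem.Set.empty

def pvR (d : PySem.Dict Int (PySem.Set Int)) (a b : Int) : Prop := b ∈ pvAdj d a

-- the common specification: some node reachable from start has an edge to target
def pvAns (E : List (Int × Int)) (start target : Int) : Prop :=
  ∃ u, Relation.ReflTransGen (fun a b => (a, b) ∈ E) start u ∧ (u, target) ∈ E

lemma pvGet?_erase (d : PySem.Dict Int (PySem.Set Int)) (k a : Int) :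
    (d.erase k).get? a = if a = k then none else d.get? a := by
  rcases d with ⟨items⟩
  simp only [PySem.Dict.erase, PySem.Dict.get?]
  induction items with
  | nil => simp
  | cons p t ih =>
    rw [List.filter_cons]
    by_cases h1 : p.1 = k
    · rw [if_neg (by simp [h1])]
      rw [ih]
      by_cases h2 : a = k
      · simp [h2]
      · rw [if_neg h2, if_neg h2, List.find?_cons_of_neg (by simp [h1]; omega)]
    · rw [if_pos (by simp [h1])]
      by_cases h2 : p.1 = a
      · rw [List.find?_cons_of_pos (by simp [h2]), List.find?_cons_of_pos (by simp [h2]),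
          if_neg (by rw [← h2]; exact h1)]
      · rw [List.find?_cons_of_neg (by simp [h2]), List.find?_cons_of_neg (by simp [h2]), ih]

lemma pvMem_adj_erase (d : PySem.Dict Int (PySem.Set Int)) (k a b : Int) :
    b ∈ pvAdj (d.erase k) a ↔ a ≠ k ∧ b ∈ pvAdj d a := by
  unfold pvAdj
  rw [PySem.Dict.getD_eq_get?_getD, PySem.Dict.getD_eq_get?_getD, pvGet?_erase]
  by_cases h : a = k <;> simp [h, PySem.Set.empty]


lemma pvMem_adj_foldl (l : List (List Int)) (d : PySem.Dict Int (PySem.Set Int)) (a b : Int) :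
    b ∈ pvAdj (l.foldl
        (fun d row => d.modify (pvAt0 row) PySem.Set.empty (fun s => s.add (pvAt1 row))) d) a ↔
      b ∈ pvAdj d a ∨ (a, b) ∈ pvEdges l := by
  induction l generalizing d with
  | nil => simp [pvEdges]
  | cons row t ih =>
    rw [List.foldl_cons, ih]
    have hmod : b ∈ pvAdj (d.modify (pvAt0 row) PySem.Set.empty (fun s => s.add (pvAt1 row))) a ↔
        (b ∈ pvAdj d a ∨ (a = pvAt0 row ∧ b = pvAt1 row)) := by
      unfold pvAdj
      rw [PySem.Dict.getD_modify]
      by_cases ha : a = pvAt0 row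
      · rw [if_pos ha, PySem.Set.mem_add, ha]
        tauto
      · rw [if_neg ha]
        tauto
    rw [hmod]
    simp only [pvEdges, List.map_cons, List.mem_cons, Prod.mk.injEq]
    tauto

-- characterisation of the built adjacency dict
lemma pvMem_adj_build (graph : List (List Int)) (a b : Int) :
    b ∈ pvAdj (pvBuildRouts graph) a ↔ (a, b) ∈ pvEdges graph := by
  unfold pvBuildRouts
  rw [pvMem_adj_foldl]
  have : pvAdj PySem.Dict.empty a = PySem.Set.empty := by
    unfold pvAdj
    simp [PySem.Dict.getD_eq_get?_getD, PySem.Dict.get?, PySem.Dict.empty]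
  simp [this, PySem.Set.empty]

-- a path in d either avoids node-sourced edges or passes through node's adjacency
lemma pvReach_erase (d : PySem.Dict Int (PySem.Set Int)) (node x u : Int)
    (h : Relation.ReflTransGen (pvR d) x u) :
    Relation.ReflTransGen (pvR (d.erase node)) x u ∨
      ∃ v ∈ pvAdj d node, Relation.ReflTransGen (pvR (d.erase node)) v u := by
  induction h using Relation.ReflTransGen.head_induction_on with
  | refl => exact Or.inl .refl
  | head hstep _ ih =>
    rename_i a c _
    rcases ih with ih | ih
    · by_cases ha : a = node
      · subst ha
        exact Or.inr ⟨c, hstep, ih⟩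
      · exact Or.inl (Relation.ReflTransGen.head
          ((pvMem_adj_erase d node a c).mpr ⟨ha, hstep⟩) ih)
    · exact Or.inr ih


lemma pvState_step (d : PySem.Dict Int (PySem.Set Int)) (node target : Int) (qrest : List Int)
    (ht : target ∉ pvAdj d node) :
    (∃ x ∈ qrest ++ pvAdj d node, ∃ u,
        Relation.ReflTransGen (pvR (d.erase node)) x u ∧ target ∈ pvAdj (d.erase node) u) ↔
      (∃ x ∈ node :: qrest, ∃ u, Relation.ReflTransGen (pvR d) x u ∧ target ∈ pvAdj d u) := by
  constructor
  · rintro ⟨x, hx, u, p, hu⟩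
    have p' : Relation.ReflTransGen (pvR d) x u :=
      p.mono (fun a b h => ((pvMem_adj_erase d node a b).mp h).2)
    have hu' : target ∈ pvAdj d u := ((pvMem_adj_erase d node u target).mp hu).2
    rcases List.mem_append.mp hx with hxq | hxp
    · exact ⟨x, List.mem_cons_of_mem _ hxq, u, p', hu'⟩
    · exact ⟨node, List.mem_cons_self .., u, Relation.ReflTransGen.head hxp p', hu'⟩
  · rintro ⟨x, hx, u, p, hu⟩
    have hune : u ≠ node := fun h => ht (h ▸ hu)
    have hu' : target ∈ pvAdj (d.erase node) u := (pvMem_adj_erase d node u target).mpr ⟨hune, hu⟩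
    rcases pvReach_erase d node x u p with p' | ⟨v, hv, p'⟩
    · rcases List.mem_cons.mp hx with rfl | hxq
      · rcases p'.cases_head with rfl | ⟨c, hc, _⟩
        · exact absurd rfl hune
        · exact absurd rfl ((pvMem_adj_erase _ _ _ c).mp hc).1
      · exact ⟨x, List.mem_append_left _ hxq, u, p', hu'⟩
    · exact ⟨v, List.mem_append_right _ hv, u, p', hu'⟩

-- the BFS loop returns true iff some node reachable from the queue has a target edge
lemma pvBfsA_iff (target : Int) (d : PySem.Dict Int (PySem.Set Int)) (q : List Int) :
    pvBfsA target d q = true ↔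
      ∃ x ∈ q, ∃ u, Relation.ReflTransGen (pvR d) x u ∧ target ∈ pvAdj d u := by
  induction d, q using pvBfsA.induct (target := target) with
  | case1 routs => simp [pvBfsA]
  | case2 routs node qrest hitems =>
    have hadj : ∀ u, pvAdj routs u = PySem.Set.empty := by
      intro u
      unfold pvAdj
      rw [PySem.Dict.getD_eq_get?_getD]
      simp [PySem.Dict.get?, hitems]
    have hfalse : pvBfsA target routs (node :: qrest) = false := by
      rw [pvBfsA.eq_def]
      simp [hitems]
    rw [hfalse]
    simp [hadj, PySem.Set.empty]
  | case3 routs node qrest hitems hc =>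
    have hmem : target ∈ pvAdj routs node := by
      unfold pvAdj
      simpa using hc
    have htrue : pvBfsA target routs (node :: qrest) = true := by
      rw [pvBfsA.eq_def]
      simp [hitems]
      exact Or.inl hmem
    rw [htrue]
    exact iff_of_true rfl ⟨node, List.mem_cons_self .., node, .refl, hmem⟩
  | case4 routs node qrest hitems hc ih =>
    have ht : target ∉ pvAdj routs node := by
      unfold pvAdj
      intro hmem
      exact hc (by simpa using hmem)
    have hstep : pvBfsA target routs (node :: qrest) =
        pvBfsA target (routs.erase node) (qrest ++ routs.getD node PySem.Set.empty) := by
      rw [pvBfsA.eq_def]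
      simp [hitems]
      intro hmem
      exact absurd hmem ht
    rw [hstep, ih]
    exact pvState_step routs node target qrest ht

lemma pvA_iff (n : Int) (graph : List (List Int)) (start target : Int) :
    findWhetherExistsPath n graph start target = true ↔ pvAns (pvEdges graph) start target := by
  unfold findWhetherExistsPath
  rw [pvBfsA_iff]
  have hrel : ∀ a b : Int, pvR (pvBuildRouts graph) a b ↔ (a, b) ∈ pvEdges graph :=
    fun a b => pvMem_adj_build graph a b
  unfold pvAns
  constructor
  · rintro ⟨x, hx, u, p, hu⟩
    rcases List.mem_singleton.mp hx with rfl
    exact ⟨u, p.mono (fun a b h => (hrel a b).mp h), (hrel u target).mp hu⟩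
  · rintro ⟨u, p, hu⟩
    exact ⟨start, List.mem_singleton.mpr rfl, u,
      p.mono (fun a b h => (hrel a b).mpr h), (hrel u target).mpr hu⟩

-- ---- B side ----

lemma pvPass_extend (E : List (Int × Int)) (r : PySem.Set Int) :
    ∃ ext, pvPass E r = r ++ ext := by
  induction E generalizing r with
  | nil => exact ⟨[], by simp [pvPass]⟩
  | cons e t ih =>
    have hstep : ∃ d0, (if r.contains e.1 = true then r.add e.2 else r) = r ++ d0 := by
      by_cases h1 : r.contains e.1 = true
      · rw [if_pos h1]
        simp only [PySem.Set.add]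
        by_cases h2 : r.contains e.2 = true
        · exact ⟨[], by rw [if_pos h2, List.append_nil]⟩
        · exact ⟨[e.2], by rw [if_neg h2]⟩
      · exact ⟨[], by rw [if_neg h1, List.append_nil]⟩
    obtain ⟨d0, hd0⟩ := hstep
    obtain ⟨ext, hext⟩ := ih (if r.contains e.1 = true then r.add e.2 else r)
    refine ⟨d0 ++ ext, ?_⟩
    have hcons : pvPass (e :: t) r = pvPass t (if r.contains e.1 = true then r.add e.2 else r) := by
      simp only [pvPass, List.foldl_cons]
    rw [hcons, hext, hd0, List.append_assoc]

lemma pvPass_mem_step (E : List (Int × Int)) (r : PySem.Set Int) (u v : Int)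
    (he : (u, v) ∈ E) (hu : u ∈ r) : v ∈ pvPass E r := by
  induction E generalizing r with
  | nil => cases he
  | cons e t ih =>
    rcases List.mem_cons.mp he with rfl | he'
    · have hc : r.contains u = true := by simpa [PySem.Set.contains] using hu
      have h1 : pvPass ((u, v) :: t) r = pvPass t (r.add v) := by
        simp [pvPass, hu]
      rw [h1]
      obtain ⟨ext, hext⟩ := pvPass_extend t (r.add v)
      rw [hext]
      exact List.mem_append_left _ ((PySem.Set.mem_add r v v).mpr (Or.inr rfl))
    · have hu' : u ∈ (if r.contains e.1 = true then r.add e.2 else r) := by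
        split
        · exact (PySem.Set.mem_add r e.2 u).mpr (Or.inl hu)
        · exact hu
      have h2 := ih _ he' hu'
      have hcons : pvPass (e :: t) r = pvPass t (if r.contains e.1 = true then r.add e.2 else r) := by
        simp only [pvPass, List.foldl_cons]
      rw [hcons]
      exact h2

lemma pvFold_sound_aux (E : List (Int × Int)) (start : Int) (l : List (Int × Int))
    (hsub : ∀ e ∈ l, e ∈ E) (r : PySem.Set Int)
    (h : ∀ x ∈ r, Relation.ReflTransGen (fun a b => (a, b) ∈ E) start x) :
    ∀ x ∈ l.foldl (fun r e => if r.contains e.1 then r.add e.2 else r) r,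
      Relation.ReflTransGen (fun a b => (a, b) ∈ E) start x := by
  induction l generalizing r with
  | nil => exact h
  | cons e t ih =>
    refine ih (fun e' he' => hsub e' (List.mem_cons_of_mem _ he')) _ ?_
    intro x hx
    have hx' : x ∈ (if r.contains e.1 = true then r.add e.2 else r) := hx
    by_cases hc : r.contains e.1 = true
    · rw [if_pos hc] at hx'
      rcases (PySem.Set.mem_add r e.2 x).mp hx' with hx' | rfl
      · exact h x hx'
      · have he1 : e.1 ∈ r := by simpa [PySem.Set.contains] using hc
        have hE : (e.1, e.2) ∈ E := by
          have := hsub e (List.mem_cons_self ..)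
          simpa using this
        exact (h e.1 he1).tail hE
    · rw [if_neg hc] at hx'
      exact h x hx'

lemma pvFold_bound_aux (E : List (Int × Int)) (start : Int) (l : List (Int × Int))
    (hsub : ∀ e ∈ l, e ∈ E) (r : PySem.Set Int)
    (h : ∀ x ∈ r, x = start ∨ x ∈ E.map Prod.snd) :
    ∀ x ∈ l.foldl (fun r e => if r.contains e.1 then r.add e.2 else r) r,
      x = start ∨ x ∈ E.map Prod.snd := by
  induction l generalizing r with
  | nil => exact h
  | cons e t ih =>
    refine ih (fun e' he' => hsub e' (List.mem_cons_of_mem _ he')) _ ?_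
    intro x hx
    have hx' : x ∈ (if r.contains e.1 = true then r.add e.2 else r) := hx
    by_cases hc : r.contains e.1 = true
    · rw [if_pos hc] at hx'
      rcases (PySem.Set.mem_add r e.2 x).mp hx' with hx' | rfl
      · exact h x hx'
      · exact Or.inr (List.mem_map.mpr ⟨e, hsub e (List.mem_cons_self ..), rfl⟩)
    · rw [if_neg hc] at hx'
      exact h x hx'

lemma pvPass_sound (E : List (Int × Int)) (r : PySem.Set Int) (start : Int)
    (h : ∀ x ∈ r, Relation.ReflTransGen (fun a b => (a, b) ∈ E) start x) :
    ∀ x ∈ pvPass E r, Relation.ReflTransGen (fun a b => (a, b) ∈ E) start x := by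
  exact pvFold_sound_aux E start E (fun _ he => he) r h

lemma pvPass_bound (E : List (Int × Int)) (r : PySem.Set Int) (start : Int)
    (h : ∀ x ∈ r, x = start ∨ x ∈ E.map Prod.snd) :
    ∀ x ∈ pvPass E r, x = start ∨ x ∈ E.map Prod.snd := by
  exact pvFold_bound_aux E start E (fun _ he => he) r h

lemma pvPass_nodup (E : List (Int × Int)) (r : PySem.Set Int) (h : r.Nodup) :
    (pvPass E r).Nodup := by
  induction E generalizing r with
  | nil => exact h
  | cons e t ih =>
    have hstep : (if r.contains e.1 = true then r.add e.2 else r).Nodup := by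
      split
      · exact PySem.Set.nodup_add r e.2 h
      · exact h
    have h2 := ih _ hstep
    have hcons : pvPass (e :: t) r = pvPass t (if r.contains e.1 = true then r.add e.2 else r) := by
      simp only [pvPass, List.foldl_cons]
    rw [hcons]
    exact h2

lemma pvIter_fix (E : List (Int × Int)) (start : Int) :
    pvPass E ((pvPass E)^[E.length] (PySem.Set.ofList [start])) =
      (pvPass E)^[E.length] (PySem.Set.ofList [start]) := by
  set F := pvPass E with hF
  set r0 := PySem.Set.ofList [start] with hr0
  have hinv : ∀ i, (∀ x ∈ F^[i] r0, x = start ∨ x ∈ E.map Prod.snd) ∧ (F^[i] r0).Nodup := by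
    intro i
    induction i with
    | zero =>
      refine ⟨fun x hx => Or.inl ?_, by rw [Function.iterate_zero_apply]; exact PySem.Set.nodup_ofList _⟩
      rw [Function.iterate_zero_apply] at hx
      simpa using (PySem.Set.mem_ofList [start] x).mp hx
    | succ i ih =>
      rw [Function.iterate_succ_apply']
      exact ⟨pvPass_bound E _ start ih.1, pvPass_nodup E _ ih.2⟩
  have key : ∀ i, F (F^[i] r0) = F^[i] r0 ∨ i + 1 ≤ (F^[i] r0).length := by
    intro i
    induction i with
    | zero =>
      right
      rw [Function.iterate_zero_apply]
      have : start ∈ r0 := (PySem.Set.mem_ofList [start] start).mpr (by simp)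
      have := List.length_pos_of_mem this
      omega
    | succ i ih =>
      by_cases hfix : F (F^[i] r0) = F^[i] r0
      · left
        rw [Function.iterate_succ_apply', hfix]
        exact hfix
      · rcases ih with ih | ih
        · exact absurd ih hfix
        · right
          rw [Function.iterate_succ_apply']
          obtain ⟨ext, hext⟩ := pvPass_extend E (F^[i] r0)
          have hne : ext ≠ [] := by
            intro h
            exact hfix (by rw [← hF] at hext; rw [hext, h, List.append_nil])
          have hlp : 0 < ext.length := List.length_pos_of_ne_nil hne
          rw [← hF] at hext
          rw [hext, List.length_append]
          omega
  rcases key E.length with hfix | hlen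
  · exact hfix
  · obtain ⟨ext, hext⟩ := pvPass_extend E (F^[E.length] r0)
    rw [← hF] at hext
    have hbound := (hinv (E.length + 1)).1
    rw [Function.iterate_succ_apply'] at hbound
    have hnd := (hinv (E.length + 1)).2
    rw [Function.iterate_succ_apply'] at hnd
    have hsub : F (F^[E.length] r0) ⊆ start :: E.map Prod.snd := by
      intro x hx
      rcases hbound x hx with rfl | h
      · exact List.mem_cons_self ..
      · exact List.mem_cons_of_mem _ h
    have hle : (F (F^[E.length] r0)).length ≤ E.length + 1 := by
      have := (List.subperm_of_subset hnd hsub).length_le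
      simpa using this
    rw [hext, List.length_append] at hle
    have hext0 : ext = [] := List.eq_nil_of_length_eq_zero (by omega)
    rw [hext, hext0, List.append_nil]

lemma pvB_iff (n : Int) (graph : List (List Int)) (start target : Int) :
    findWhetherExistsPath_alt n graph start target = true ↔ pvAns (pvEdges graph) start target := by
  have hfold : ∀ (l : List Int) (r : PySem.Set Int),
      l.foldl (fun r _ => pvPass (pvEdges graph) r) r = (pvPass (pvEdges graph))^[l.length] r := by
    intro l
    induction l with
    | nil => intro r; simp
    | cons a t ih =>
      intro r
      simp only [List.foldl_cons, List.length_cons, ih, Function.iterate_succ_apply]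
  have hlen : (PySem.List.pyRange 0 (graph.length : Int) 1).length = graph.length := by
    simp [pysem]
  have hElen : (pvEdges graph).length = graph.length := by simp [pvEdges]
  have hreach : (PySem.List.pyRange 0 (graph.length : Int) 1).foldl
      (fun r _ => pvPass (pvEdges graph) r) (PySem.Set.ofList [start]) =
      (pvPass (pvEdges graph))^[(pvEdges graph).length] (PySem.Set.ofList [start]) := by
    rw [hfold, hlen, hElen]
  have hstart : ∀ i, start ∈ (pvPass (pvEdges graph))^[i] (PySem.Set.ofList [start]) := by
    intro i
    induction i with
    | zero => exact (PySem.Set.mem_ofList [start] start).mpr (by simp)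
    | succ i ih =>
      rw [Function.iterate_succ_apply']
      obtain ⟨ext, hext⟩ := pvPass_extend (pvEdges graph) _
      rw [hext]
      exact List.mem_append_left _ ih
  have hsound : ∀ i, ∀ x ∈ (pvPass (pvEdges graph))^[i] (PySem.Set.ofList [start]),
      Relation.ReflTransGen (fun a b => (a, b) ∈ pvEdges graph) start x := by
    intro i
    induction i with
    | zero =>
      intro x hx
      rw [Function.iterate_zero_apply] at hx
      have := (PySem.Set.mem_ofList [start] x).mp hx
      simp only [List.mem_singleton] at this
      exact this ▸ Relation.ReflTransGen.refl
    | succ i ih =>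
      rw [Function.iterate_succ_apply']
      exact pvPass_sound _ _ _ ih
  have hfix := pvIter_fix (pvEdges graph) start
  have hcomplete : ∀ u, Relation.ReflTransGen (fun a b => (a, b) ∈ pvEdges graph) start u →
      u ∈ (pvPass (pvEdges graph))^[(pvEdges graph).length] (PySem.Set.ofList [start]) := by
    intro u p
    induction p with
    | refl => exact hstart _
    | tail _ hstep ih =>
      have := pvPass_mem_step (pvEdges graph) _ _ _ hstep ih
      rwa [hfix] at this
  show (pvEdges graph).any _ = true ↔ _
  rw [hreach, List.any_eq_true]
  unfold pvAns
  constructor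
  · rintro ⟨e, he, hb⟩
    rw [Bool.and_eq_true, beq_iff_eq] at hb
    obtain ⟨hb1, hb2⟩ := hb
    have he1 : e.1 ∈ (pvPass (pvEdges graph))^[(pvEdges graph).length] (PySem.Set.ofList [start]) := by
      simpa [PySem.Set.contains] using hb1
    exact ⟨e.1, hsound _ _ he1, by rw [← hb2]; simpa using he⟩
  · rintro ⟨u, p, hu⟩
    refine ⟨(u, target), hu, ?_⟩
    rw [Bool.and_eq_true, beq_iff_eq]
    exact ⟨by simpa [PySem.Set.contains] using hcomplete u p, rfl⟩

-- ===== VERDICT (by name: the statement is the Claim_ definition above) =====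
theorem findWhetherExistsPath_spec : Claim_equal_findWhetherExistsPath := by
  intro n graph start target _ _
  unfold Spec_findWhetherExistsPath
  have h := (pvA_iff n graph start target).trans (pvB_iff n graph start target).symm
  cases hA : findWhetherExistsPath n graph start target <;>
    cases hB : findWhetherExistsPath_alt n graph start target <;> simp_all
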